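-- pv_equiv track=rewrite | github.com/shalinder88/franchisel | fdd-vault/v7_extractor/workers/item19_deep_parser.py | _is_state_table
-- ===== SOURCE A (Python) =====
-- from typing import Any, Dict, List, Optional, Tuple
--
-- def _is_state_table(rows: List, cols: List) -> bool:
--     all_text = " ".join(" ".join(r) for r in rows if r).lower()
--     col_text = " ".join(cols).lower() if cols else ""
--     combined = f"{col_text} {all_text}"
--     if "state" in combined and any(s in combined for s in ["arizona", "california", "colorado", "utah", "texas", "nevada"]):
--         if "outlet" in combined or "franchise" in combined:
--             return True
--     return False
-- ===== SOURCE B (Python) =====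
-- _STATE_NAMES = ("arizona", "california", "colorado", "utah", "texas", "nevada")
--
-- def _iter_cells(rows, cols):
--     yield from cols
--     for r in rows:
--         if r:
--             yield from r
--
-- def _is_state_table(rows, cols):
--     has_state = has_name = has_kw = False
--     for cell in _iter_cells(rows, cols):
--         c = cell.lower()
--         if not has_state and "state" in c:
--             has_state = True
--         if not has_name and any(s in c for s in _STATE_NAMES):
--             has_name = True
--         if not has_kw and ("outlet" in c or "franchise" in c):
--             has_kw = True
--         if has_state and has_name and has_kw:
--             return True
--     return has_state and has_name and has_kw
-- ===== Notes on version B (the rewrite author's own statement) =====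
-- stated objective: simpler
-- what changed: B replaces A's build-one-big-joined-lowercased-string-then-rescan-it-per-keyword approach with a single pass over the individual cells (columns first, then cells of non-empty rows), maintaining three flags with early exit once all are set; no combined string is ever materialised.
import Mathlib
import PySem

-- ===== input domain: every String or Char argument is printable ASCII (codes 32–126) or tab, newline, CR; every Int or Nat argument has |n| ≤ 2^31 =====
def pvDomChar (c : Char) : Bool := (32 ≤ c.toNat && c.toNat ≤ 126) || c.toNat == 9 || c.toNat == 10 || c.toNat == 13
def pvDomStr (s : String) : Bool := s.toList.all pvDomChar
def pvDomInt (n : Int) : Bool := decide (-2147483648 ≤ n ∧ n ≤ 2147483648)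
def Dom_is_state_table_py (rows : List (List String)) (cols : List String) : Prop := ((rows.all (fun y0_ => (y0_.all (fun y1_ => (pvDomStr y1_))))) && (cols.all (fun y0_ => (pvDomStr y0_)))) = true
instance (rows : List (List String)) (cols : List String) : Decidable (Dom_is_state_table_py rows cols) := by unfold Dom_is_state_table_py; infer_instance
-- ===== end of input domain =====

-- B replaces A's combined-string-plus-rescans with one pass over the cells keeping three flags (same substring semantics); objective: simpler.

-- ===== PORT A =====
def is_state_table_py (rows : List (List String)) (cols : List String) : Bool :=
  let all_text := PySem.Str.lower (PySem.Str.join " "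
    ((rows.filter (fun r => !r.isEmpty)).map (fun r => PySem.Str.join " " r)))
  let col_text := if !cols.isEmpty then PySem.Str.lower (PySem.Str.join " " cols) else ""
  let combined := col_text ++ " " ++ all_text
  if PySem.Str.isIn "state" combined &&
     (["arizona", "california", "colorado", "utah", "texas", "nevada"].any
        (fun s => PySem.Str.isIn s combined)) then
    if PySem.Str.isIn "outlet" combined || PySem.Str.isIn "franchise" combined then
      true
    else false
  else false

-- ===== PORT B =====
def altStateNames : List String := ["arizona", "california", "colorado", "utah", "texas", "nevada"]

-- the single pass of Source B: one cell at a time, three flags, early exit when all set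
def altLoop : List String → Bool → Bool → Bool → Bool
  | [], hs, hn, hk => hs && hn && hk
  | cell :: rest, hs, hn, hk =>
    let c := PySem.Str.lower cell
    let hs' := hs || PySem.Str.isIn "state" c
    let hn' := hn || altStateNames.any (fun s => PySem.Str.isIn s c)
    let hk' := hk || (PySem.Str.isIn "outlet" c || PySem.Str.isIn "franchise" c)
    if hs' && hn' && hk' then true else altLoop rest hs' hn' hk'

def is_state_table_py_alt (rows : List (List String)) (cols : List String) : Bool :=
  altLoop (cols ++ ((rows.filter (fun r => !r.isEmpty)).flatten)) false false false

-- ===== PRECONDITION & SPEC =====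
def Spec_is_state_table_py (rows : List (List String)) (cols : List String) (out : Bool) : Prop := out = is_state_table_py_alt rows cols
instance (rows : List (List String)) (cols : List String) (out : Bool) : Decidable (Spec_is_state_table_py rows cols out) := by unfold Spec_is_state_table_py; infer_instance

-- ===== CLAIM (what is proved, stated in full; the proofs are below) =====
def Claim_equal_is_state_table_py : Prop := ∀ (rows : List (List String)) (cols : List String), Dom_is_state_table_py rows cols → Spec_is_state_table_py rows cols (is_state_table_py rows cols)

-- ===== LEMMAS AND PROOFS =====

-- a space-free nonempty word is an infix of `p ++ ' ' :: q` iff it is an infix of p or of q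
lemma infix_sep_split (kw p q : List Char) (hsp : ' ' ∉ kw) :
    kw <:+: (p ++ ' ' :: q) ↔ (kw <:+: p ∨ kw <:+: q) := by
  constructor
  · rintro ⟨s, t, hst⟩
    by_cases h1 : s.length + kw.length ≤ p.length
    · left
      have hsl : s.length ≤ p.length := le_trans (Nat.le_add_right _ _) h1
      have he : kw ++ t = p.drop s.length ++ ' ' :: q := by
        have h := congrArg (List.drop s.length) hst
        rwa [List.append_assoc, List.drop_left, List.drop_append_of_le_length hsl] at h
      have hlen : kw.length ≤ (p.drop s.length).length := by
        simp only [List.length_drop]; omega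
      have hpref : kw <+: p.drop s.length := by
        have h := congrArg (List.take kw.length) he
        rw [List.take_left' rfl, List.take_append_of_le_length hlen] at h
        rw [h]
        exact List.take_prefix _ _
      exact hpref.isInfix.trans (List.drop_suffix _ _).isInfix
    · by_cases h2 : s.length ≤ p.length
      · -- kw straddles the separator: ' ' ∈ kw, contradiction
        exfalso
        have he : kw ++ t = p.drop s.length ++ ' ' :: q := by
          have h := congrArg (List.drop s.length) hst
          rwa [List.append_assoc, List.drop_left, List.drop_append_of_le_length h2] at h
        have hlt : (p.drop s.length).length < kw.length := by
          simp only [List.length_drop]; omega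
        have hsp' : (' ' : Char) ∈ kw := by
          have h := congrArg (fun l => l[(p.drop s.length).length]?) he
          simp only at h
          rw [List.getElem?_append_left hlt] at h
          have hr : (p.drop s.length ++ ' ' :: q)[(p.drop s.length).length]? = some ' ' := by
            rw [List.getElem?_append_right (le_refl _)]
            simp
          rw [hr] at h
          exact List.mem_of_getElem? h
        exact hsp hsp'
      · right
        rw [not_le] at h2
        obtain ⟨m, hm⟩ : ∃ m, s.length = p.length + 1 + m :=
          ⟨s.length - (p.length + 1), by omega⟩
        have he : kw ++ t = q.drop m := by
          have h := congrArg (List.drop s.length) hst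
          rw [List.append_assoc, List.drop_left] at h
          rw [hm] at h
          rw [show p.length + 1 + m = (p ++ [' ']).length + m by simp,
            show p ++ ' ' :: q = (p ++ [' ']) ++ q by simp, List.drop_append] at h
          rw [List.drop_eq_nil_of_le (by simp)] at h
          simpa using h
        have hpref : kw <+: q.drop m := ⟨t, he⟩
        exact hpref.isInfix.trans (List.drop_suffix _ _).isInfix
  · rintro (h | h)
    · exact h.trans ⟨[], ' ' :: q, by simp⟩
    · exact h.trans ⟨p ++ [' '], [], by simp⟩

-- a space-free nonempty word is an infix of ' '.join(parts) iff it is an infix of some part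
lemma infix_join_space (kw : List Char) (hne : kw ≠ []) (hsp : ' ' ∉ kw)
    (parts : List (List Char)) :
    kw <:+: PySem.Chars.join [' '] parts ↔ ∃ p ∈ parts, kw <:+: p := by
  induction parts with
  | nil => simp [PySem.Chars.join_nil, List.infix_nil, hne]
  | cons p rest ih =>
    cases rest with
    | nil => simp [PySem.Chars.join_singleton]
    | cons q rest' =>
      rw [PySem.Chars.join_cons_cons]
      rw [List.append_assoc]
      simp only [List.singleton_append]
      rw [infix_sep_split kw p _ hsp, ih]
      simp

lemma lower_join_space (parts : List (List Char)) :
    PySem.Chars.lower (PySem.Chars.join [' '] parts)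
      = PySem.Chars.join [' '] (parts.map PySem.Chars.lower) := by
  induction parts with
  | nil => simp [PySem.Chars.join_nil, PySem.Chars.lower]
  | cons p rest ih =>
    cases rest with
    | nil => simp [PySem.Chars.join_singleton]
    | cons q rest' =>
      have h2 : PySem.Chars.join [' '] (PySem.Chars.lower p :: List.map PySem.Chars.lower (q :: rest'))
          = PySem.Chars.lower p ++ [' '] ++ PySem.Chars.join [' '] (List.map PySem.Chars.lower (q :: rest')) := by
        simp only [List.map_cons, PySem.Chars.join_cons_cons]
      rw [List.map_cons, h2, PySem.Chars.join_cons_cons, ← ih]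
      have hsp : PySem.Chars.lower [' '] = [' '] := by decide
      simp [PySem.Chars.lower] at hsp ⊢
      simp [hsp]

-- infix of the lowered join ⟺ infix of the lowering of some part
lemma infix_lower_join (kw : List Char) (hne : kw ≠ []) (hsp : ' ' ∉ kw)
    (parts : List (List Char)) :
    kw <:+: PySem.Chars.lower (PySem.Chars.join [' '] parts)
      ↔ ∃ p ∈ parts, kw <:+: PySem.Chars.lower p := by
  rw [lower_join_space, infix_join_space kw hne hsp]
  simp

-- the membership test a keyword kw performs on A's combined string, characterised cell-wise
-- 'kw in lower(" ".join(ss))' is a cell-wise test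
lemma infix_lower_join_str (kw : List Char) (hne : kw ≠ []) (hsp : ' ' ∉ kw) (ss : List String) :
    kw <:+: (PySem.Str.lower (PySem.Str.join " " ss)).toList
      ↔ ∃ c ∈ ss, kw <:+: PySem.Chars.lower c.toList := by
  rw [PySem.Str.toList_lower, PySem.Str.toList_join,
    show (" " : String).toList = [' '] from rfl, infix_lower_join kw hne hsp]
  constructor
  · rintro ⟨p, hp, h⟩
    obtain ⟨c, hc, rfl⟩ := List.mem_map.mp hp
    exact ⟨c, hc, h⟩
  · rintro ⟨c, hc, h⟩
    exact ⟨c.toList, List.mem_map.mpr ⟨c, hc, rfl⟩, h⟩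

-- the membership test a keyword kw performs on A's combined string, characterised cell-wise
lemma isIn_combined (rows : List (List String)) (cols : List String)
    (kw : String) (hne : kw.toList ≠ []) (hsp : ' ' ∉ kw.toList) :
    PySem.Str.isIn kw
      ((if !cols.isEmpty then PySem.Str.lower (PySem.Str.join " " cols) else "") ++ " " ++
        PySem.Str.lower (PySem.Str.join " "
          ((rows.filter (fun r => !r.isEmpty)).map (fun r => PySem.Str.join " " r)))) = true
      ↔ ∃ c ∈ cols ++ ((rows.filter (fun r => !r.isEmpty)).flatten),
          kw.toList <:+: PySem.Chars.lower c.toList := by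
  rw [PySem.Str.isIn_eq, PySem.Chars.isIn_iff_infix]
  have htl : ∀ x y : String, (x ++ " " ++ y).toList = x.toList ++ ' ' :: y.toList := by
    intro x y; simp
  rw [htl, infix_sep_split kw.toList _ _ hsp]
  have hall : kw.toList <:+: (PySem.Str.lower (PySem.Str.join " "
        ((rows.filter (fun r => !r.isEmpty)).map (fun r => PySem.Str.join " " r)))).toList
      ↔ ∃ c ∈ (rows.filter (fun r => !r.isEmpty)).flatten,
          kw.toList <:+: PySem.Chars.lower c.toList := by
    rw [infix_lower_join_str kw.toList hne hsp]
    constructor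
    · rintro ⟨s, hs, h⟩
      obtain ⟨r, hr, rfl⟩ := List.mem_map.mp hs
      rw [PySem.Str.toList_join,
        show (" " : String).toList = [' '] from rfl, infix_lower_join kw.toList hne hsp] at h
      obtain ⟨p, hp, h⟩ := h
      obtain ⟨c, hc, rfl⟩ := List.mem_map.mp hp
      exact ⟨c, List.mem_flatten.mpr ⟨r, hr, hc⟩, h⟩
    · rintro ⟨c, hc, h⟩
      obtain ⟨r, hr, hcr⟩ := List.mem_flatten.mp hc
      refine ⟨PySem.Str.join " " r, List.mem_map.mpr ⟨r, hr, rfl⟩, ?_⟩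
      rw [PySem.Str.toList_join,
        show (" " : String).toList = [' '] from rfl, infix_lower_join kw.toList hne hsp]
      exact ⟨c.toList, List.mem_map.mpr ⟨c, hcr, rfl⟩, h⟩
  by_cases hc : cols.isEmpty
  · obtain rfl : cols = [] := List.isEmpty_iff.mp hc
    simp only [List.isEmpty_nil, Bool.not_true, Bool.false_eq_true, reduceIte,
      List.nil_append]
    rw [hall]
    simp [List.infix_nil, hne]
  · rw [if_pos (by simp_all), hall, infix_lower_join_str kw.toList hne hsp]
    constructor
    · rintro (⟨c, hcm, h⟩ | ⟨c, hcm, h⟩)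
      · exact ⟨c, List.mem_append.mpr (Or.inl hcm), h⟩
      · exact ⟨c, List.mem_append.mpr (Or.inr hcm), h⟩
    · rintro ⟨c, hcm, h⟩
      rcases List.mem_append.mp hcm with hm | hm
      · exact Or.inl ⟨c, hm, h⟩
      · exact Or.inr ⟨c, hm, h⟩

-- the three flags computed by altLoop, as membership tests over the remaining cells
lemma altLoop_eq (cells : List String) (hs hn hk : Bool) :
    altLoop cells hs hn hk
      = ((hs || cells.any (fun c => PySem.Str.isIn "state" (PySem.Str.lower c)))
        && (hn || cells.any (fun c => altStateNames.any (fun s => PySem.Str.isIn s (PySem.Str.lower c))))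
        && (hk || cells.any (fun c => PySem.Str.isIn "outlet" (PySem.Str.lower c)
                    || PySem.Str.isIn "franchise" (PySem.Str.lower c)))) := by
  induction cells generalizing hs hn hk with
  | nil => simp [altLoop]
  | cons c rest ih =>
    rw [altLoop, ih]
    simp only [List.any_cons]
    generalize PySem.Str.isIn "state" (PySem.Str.lower c) = a1
    generalize altStateNames.any (fun s => PySem.Str.isIn s (PySem.Str.lower c)) = a2
    generalize (PySem.Str.isIn "outlet" (PySem.Str.lower c)
                    || PySem.Str.isIn "franchise" (PySem.Str.lower c)) = a3
    generalize rest.any (fun c => PySem.Str.isIn "state" (PySem.Str.lower c)) = b1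
    generalize rest.any (fun c => altStateNames.any (fun s => PySem.Str.isIn s (PySem.Str.lower c))) = b2
    generalize rest.any (fun c => PySem.Str.isIn "outlet" (PySem.Str.lower c)
                    || PySem.Str.isIn "franchise" (PySem.Str.lower c)) = b3
    revert hs hn hk a1 a2 a3 b1 b2 b3
    decide

-- 'kw in cell.lower()' at the level of char lists
lemma isIn_lower_cell (s c : String) :
    PySem.Str.isIn s (PySem.Str.lower c) = true ↔ s.toList <:+: PySem.Chars.lower c.toList := by
  rw [PySem.Str.isIn_eq, PySem.Str.toList_lower, PySem.Chars.isIn_iff_infix]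

-- ===== VERDICT (by name: the statement is the Claim_ definition above) =====
theorem is_state_table_py_spec : Claim_equal_is_state_table_py := by
  intro rows cols _
  unfold Spec_is_state_table_py
  rw [Bool.eq_iff_iff]
  unfold is_state_table_py is_state_table_py_alt
  rw [altLoop_eq]
  simp only [Bool.false_or, Bool.and_eq_true, Bool.or_eq_true, List.any_eq_true,
    isIn_lower_cell,
    isIn_combined rows cols "state" (by decide) (by decide),
    isIn_combined rows cols "outlet" (by decide) (by decide),
    isIn_combined rows cols "franchise" (by decide) (by decide)]
  generalize hG : ((if (!cols.isEmpty) = true then PySem.Str.lower (PySem.Str.join " " cols) else "") ++ " " ++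
      PySem.Str.lower (PySem.Str.join " "
        (List.map (fun r => PySem.Str.join " " r) (List.filter (fun r => !r.isEmpty) rows)))) = BIG
  have hnm : ∀ s : String, s ∈ altStateNames →
      (PySem.Str.isIn s BIG = true ↔
        ∃ c ∈ cols ++ ((rows.filter (fun r => !r.isEmpty)).flatten),
          s.toList <:+: PySem.Chars.lower c.toList) := by
    intro s hs
    rw [← hG]
    refine isIn_combined rows cols s ?_ ?_ <;> fin_cases hs <;> decide
  constructor
  · intro h
    split_ifs at h with h1 h2
    · obtain ⟨hstate, s, hs, hsin⟩ := h1
      obtain ⟨c, hc, hin⟩ := (hnm s (by simpa [altStateNames] using hs)).mp hsin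
      refine ⟨⟨hstate, c, hc, s, by simpa [altStateNames] using hs, hin⟩, ?_⟩
      rcases h2 with ⟨c', hc', h'⟩ | ⟨c', hc', h'⟩
      · exact ⟨c', hc', Or.inl h'⟩
      · exact ⟨c', hc', Or.inr h'⟩
  · rintro ⟨⟨hstate, c, hc, s, hs, hin⟩, c', hc', hkw⟩
    have hc1 : (∃ c ∈ cols ++ (List.filter (fun r => !r.isEmpty) rows).flatten,
          "state".toList <:+: PySem.Chars.lower c.toList) ∧
        ∃ x ∈ ["arizona", "california", "colorado", "utah", "texas", "nevada"],
          PySem.Str.isIn x BIG = true :=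
      ⟨hstate, s, by simpa [altStateNames] using hs, (hnm s hs).mpr ⟨c, hc, hin⟩⟩
    have hc2 : (∃ x ∈ cols ++ (List.filter (fun r => !r.isEmpty) rows).flatten,
          "outlet".toList <:+: PySem.Chars.lower x.toList) ∨
        ∃ x ∈ cols ++ (List.filter (fun r => !r.isEmpty) rows).flatten,
          "franchise".toList <:+: PySem.Chars.lower x.toList := by
      rcases hkw with h' | h'
      · exact Or.inl ⟨c', hc', h'⟩
      · exact Or.inr ⟨c', hc', h'⟩
    rw [if_pos hc1, if_pos hc2]
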